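-- pv_equiv track=rewrite | github.com/srivathsmannar/ai-maturity-framework | src/ai_maturity/report.py | _extract_last_sentence
-- ===== SOURCE A (Python) =====
-- def _extract_last_sentence(text: str) -> str:
--     """Extract the last sentence from a text block."""
--     text = text.strip()
--     if not text:
--         return ""
--
--     # Split on sentence-ending punctuation followed by space or end
--     sentences: list[str] = []
--     current = []
--     for i, ch in enumerate(text):
--         current.append(ch)
--         if ch in ".!?" and (i + 1 >= len(text) or text[i + 1] == " " or text[i + 1] == "\n"):
--             sentences.append("".join(current).strip())
--             current = []
--     if current:
--         remaining = "".join(current).strip()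
--         if remaining:
--             sentences.append(remaining)
--
--     if sentences:
--         return sentences[-1]
--     return text
-- ===== SOURCE B (Python) =====
-- def _extract_last_sentence(text: str) -> str:
--     """Extract the last sentence from a text block."""
--     text = text.strip()
--     # One scan remembering where the segment after the last sentence
--     # boundary (sentence punctuation followed by space/newline) starts.
--     last = 0
--     for b in range(len(text) - 1):
--         if text[b] in ".!?" and (text[b + 1] == " " or text[b + 1] == "\n"):
--             last = b + 1
--     return text[last:].strip()
-- ===== Notes on version B (the rewrite author's own statement) =====
-- stated objective: simpler
-- what changed: Replaces A's construction of the full sentence list (per-char list appends, join+strip per flushed segment, trailing-remainder handling, then taking the last element) with a single index scan that only remembers the position after the last sentence-ending-punctuation-plus-space/newline boundary and strips one final slice.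
import Mathlib
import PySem

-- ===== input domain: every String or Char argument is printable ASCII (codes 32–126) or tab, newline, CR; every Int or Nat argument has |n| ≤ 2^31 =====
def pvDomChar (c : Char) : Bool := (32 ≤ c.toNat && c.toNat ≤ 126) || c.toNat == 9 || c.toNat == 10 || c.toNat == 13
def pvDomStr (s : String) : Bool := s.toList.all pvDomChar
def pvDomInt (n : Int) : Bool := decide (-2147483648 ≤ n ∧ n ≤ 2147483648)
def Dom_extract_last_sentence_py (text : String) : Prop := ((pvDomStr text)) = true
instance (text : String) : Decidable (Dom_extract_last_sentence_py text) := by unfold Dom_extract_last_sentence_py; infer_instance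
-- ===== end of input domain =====

-- ===== PORT A =====
-- shared helpers: the sentence-ending-punctuation test and the space/newline test
def bdC (c : Char) : Bool := c == '.' || c == '!' || c == '?'
def spC (c : Char) : Bool := c == ' ' || c == '\n'

-- A's loop body: append ch to current; flush when ch ends a sentence and the
-- next position is end-of-text / space / newline
def stepA (s : List Char) (st : List (List Char) × List Char) (p : Int × Char) :
    List (List Char) × List Char :=
  let cur := st.2 ++ [p.2]
  if bdC p.2 && (decide ((s.length : Int) ≤ p.1 + 1) ||
      (match PySem.List.pyGet? s (p.1 + 1) with
       | some c2 => spC c2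
       | none => false)) then
    (st.1 ++ [PySem.Chars.strip cur], [])
  else
    (st.1, cur)

def extract_last_sentence_py (text : String) : String :=
  let s := PySem.Chars.strip text.toList
  if s = [] then "" else
    let st := (PySem.List.enumerate s 0).foldl (stepA s) ([], [])
    let sents := if st.2 ≠ [] ∧ PySem.Chars.strip st.2 ≠ [] then st.1 ++ [PySem.Chars.strip st.2] else st.1
    match sents.getLast? with
    | some r => String.ofList r
    | none => String.ofList s

-- ===== PORT B =====
-- B keeps no sentence list: one scan remembers the position right after the
-- last boundary seen, and one final slice is stripped.
def stepB (s : List Char) (acc : Int) (b : Int) : Int :=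
  if bdC (PySem.List.pyGetD s b ' ') && spC (PySem.List.pyGetD s (b + 1) ' ') then b + 1 else acc

def extract_last_sentence_py_alt (text : String) : String :=
  let s := PySem.Chars.strip text.toList
  let last := (PySem.List.pyRange 0 ((s.length : Int) - 1) 1).foldl (stepB s) 0
  String.ofList (PySem.Chars.strip (PySem.List.slice s (some last) none))

-- ===== PRECONDITION & SPEC =====
def Spec_extract_last_sentence_py (text : String) (out : String) : Prop := out = extract_last_sentence_py_alt text
instance (text : String) (out : String) : Decidable (Spec_extract_last_sentence_py text out) := by unfold Spec_extract_last_sentence_py; infer_instance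

-- ===== CLAIM (what is proved, stated in full; the proofs are below) =====
def Claim_equal_extract_last_sentence_py : Prop := ∀ (text : String), Dom_extract_last_sentence_py text → Spec_extract_last_sentence_py text (extract_last_sentence_py text)

-- ===== LEMMAS AND PROOFS =====

-- lookahead test: end-of-text counts as a boundary-follower
def nextOk : List Char → Bool
  | [] => true
  | d :: _ => spC d

-- last sentence produced by A's loop from pending chunk `cur` over remaining text `u`
-- (none = nothing produced)
def lastSent (cur u : List Char) : Option (List Char) :=
  match u with
  | [] => if PySem.Chars.strip cur ≠ [] then some (PySem.Chars.strip cur) else none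
  | c :: t =>
    if bdC c && nextOk t then
      match lastSent [] t with
      | some x => some x
      | none => some (PySem.Chars.strip (cur ++ [c]))
    else lastSent (cur ++ [c]) t

-- suffix of `u` after its last internal boundary (sentence punctuation then space/newline), if any
def afterLast (u : List Char) : Option (List Char) :=
  match u with
  | [] => none
  | [_] => none
  | a :: b :: t =>
    match afterLast (b :: t) with
    | some r => some r
    | none => if bdC a && spC b then some (b :: t) else none

-- index form of afterLast: drop count minus one (boundary position)
def afterLastIdx (u : List Char) : Option Nat :=
  match u with
  | [] => none
  | [_] => none
  | a :: b :: t =>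
    match afterLastIdx (b :: t) with
    | some j => some (j + 1)
    | none => if bdC a && spC b then some 0 else none

-- strip [] = []
theorem strip_nil : PySem.Chars.strip [] = [] := rfl

theorem strip_ne_nil_imp {l : List Char} (h : PySem.Chars.strip l ≠ []) : l ≠ [] := by
  intro hl; rw [hl] at h; exact h strip_nil

-- a list ending in a non-space char has a nonempty strip
theorem strip_append_ne_nil {l : List Char} {c : Char}
    (hc : PySem.Chars.isspace c = false) : PySem.Chars.strip (l ++ [c]) ≠ [] := by
  unfold PySem.Chars.strip PySem.Chars.rstrip PySem.Chars.lstrip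
  intro h
  rw [List.reverse_eq_nil_iff, List.dropWhile_append] at h
  by_cases he : (l.dropWhile PySem.Chars.isspace).isEmpty = true
  · simp only [he, if_pos] at h
    simp [List.dropWhile, hc] at h
  · simp only [he, if_neg, Bool.not_eq_true] at h
    simp only [List.reverse_append, List.reverse_cons, List.reverse_nil, List.nil_append,
      List.singleton_append, List.dropWhile_cons, hc] at h
    simp at h

-- the last char of a nonempty strip is not a space
theorem strip_getLast_not_space {l : List Char} (h : PySem.Chars.strip l ≠ []) :
    PySem.Chars.isspace ((PySem.Chars.strip l).getLast h) = false := by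
  have h1 : (PySem.Chars.strip l).getLast? = some ((PySem.Chars.strip l).getLast h) :=
    List.getLast?_eq_some_getLast h
  have h2 : (PySem.Chars.strip l).getLast? =
      ((PySem.Chars.lstrip l).reverse.dropWhile PySem.Chars.isspace).head? := by
    unfold PySem.Chars.strip PySem.Chars.rstrip
    exact List.getLast?_reverse
  rw [h2] at h1
  have hne : (PySem.Chars.lstrip l).reverse.dropWhile PySem.Chars.isspace ≠ [] := by
    intro hx; rw [hx] at h1; simp at h1
  have := List.head_dropWhile_not PySem.Chars.isspace hne
  rw [List.head?_eq_some_head hne] at h1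
  rw [Option.some_inj] at h1
  rw [← h1]; exact this

-- A's loop, characterised: the last sentence of the output list
theorem foldA (s : List Char) : ∀ (u : List Char) (k : Nat) (S : List (List Char)) (cur : List Char),
    s.drop k = u →
    (let st := (PySem.List.enumerate u (k : Int)).foldl (stepA s) (S, cur);
     (if st.2 ≠ [] ∧ PySem.Chars.strip st.2 ≠ [] then st.1 ++ [PySem.Chars.strip st.2] else st.1).getLast?)
    = (match lastSent cur u with | some x => some x | none => S.getLast?) := by
  intro u
  induction u with
  | nil =>
    intro k S cur _
    simp only [PySem.List.enumerate_nil, List.foldl_nil, lastSent]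
    by_cases hs : PySem.Chars.strip cur ≠ []
    · have hcur : cur ≠ [] := strip_ne_nil_imp hs
      simp [hs, hcur]
    · simp at hs
      simp [hs]
  | cons c t ih =>
    intro k S cur hk
    have hlen : s.length - k = t.length + 1 := by
      have := congrArg List.length hk
      simp at this; omega
    have hklen : k < s.length := by omega
    have hdrop1 : s.drop (k + 1) = t := by
      rw [List.drop_add_one_eq_tail_drop, hk]; rfl
    -- the flush condition of stepA at position k equals lastSent's
    have hcond : (decide ((s.length : Int) ≤ (k : Int) + 1) ||
        (match PySem.List.pyGet? s ((k : Int) + 1) with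
         | some c2 => spC c2
         | none => false)) = nextOk t := by
      cases t with
      | nil =>
        simp only [List.length_nil] at hlen
        have : s.length = k + 1 := by omega
        simp [this, nextOk]
      | cons d t' =>
        simp only [List.length_cons] at hlen
        have hlt : k + 1 < s.length := by omega
        have hg : PySem.List.pyGet? s ((k : Int) + 1) = s[k+1]? := by
          have := PySem.List.pyGet?_natCast s (k+1)
          push_cast at this
          exact this
        have hval : s[k+1]? = some d := by
          have h2 : (s.drop (k+1))[0]? = s[(k+1)+0]? := List.getElem?_drop
          rw [hdrop1] at h2; simpa using h2.symm
        have : ¬ ((s.length : Int) ≤ (k : Int) + 1) := by omega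
        simp [hg, hval, this, nextOk]
    simp only [PySem.List.enumerate_cons, List.foldl_cons]
    show (let st := (PySem.List.enumerate t ((k:Int)+1)).foldl (stepA s) (stepA s (S, cur) ((k:Int), c)); _) = _
    have hstep : stepA s (S, cur) ((k : Int), c) =
        (if bdC c && nextOk t then
          (S ++ [PySem.Chars.strip (cur ++ [c])], ([] : List Char)) else (S, cur ++ [c])) := by
      simp only [stepA, hcond]
    have hcast : ((k : Int) + 1) = ((k + 1 : Nat) : Int) := by push_cast; ring
    rw [hstep, hcast]
    by_cases hb : (bdC c && nextOk t) = true
    · rw [if_pos hb]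
      have := ih (k+1) (S ++ [PySem.Chars.strip (cur ++ [c])]) [] hdrop1
      simp only [this]
      show _ = (match lastSent cur (c :: t) with | some x => some x | none => S.getLast?)
      simp only [lastSent, hb, if_pos]
      cases lastSent [] t with
      | none => simp
      | some x => simp
    · rw [if_neg hb]
      have := ih (k+1) S (cur ++ [c]) hdrop1
      simp only [this]
      show _ = (match lastSent cur (c :: t) with | some x => some x | none => S.getLast?)
      rw [Bool.not_eq_true] at hb
      simp only [lastSent, hb]
      simp

-- the main equivalence of the two scans: if the remaining text ends in a
-- non-space char, A's last sentence is the stripped suffix after the last boundary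
theorem lastSent_eq_afterLast : ∀ (u : List Char) (h : u ≠ []),
    PySem.Chars.isspace (u.getLast h) = false → ∀ cur,
    lastSent cur u =
      some (match afterLast u with
            | some r => PySem.Chars.strip r
            | none => PySem.Chars.strip (cur ++ u)) := by
  intro u
  induction u with
  | nil => intro h; exact absurd rfl h
  | cons c t ih =>
    intro h hsp cur
    cases t with
    | nil =>
      simp only [List.getLast_singleton] at hsp
      show (if (bdC c && nextOk []) = true then
              match lastSent [] [] with
              | some x => some x
              | none => some (PySem.Chars.strip (cur ++ [c]))
            else lastSent (cur ++ [c]) []) = _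
      by_cases hb : bdC c = true
      · simp [hb, nextOk, lastSent, strip_nil, afterLast]
      · rw [Bool.not_eq_true] at hb
        rw [if_neg (by simp [hb])]
        show (if PySem.Chars.strip (cur ++ [c]) ≠ [] then some (PySem.Chars.strip (cur ++ [c]))
              else none) = _
        rw [if_pos (strip_append_ne_nil hsp)]
        simp [afterLast]
    | cons d t' =>
      have htne : (d :: t') ≠ [] := by simp
      have hlast : (c :: d :: t').getLast h = (d :: t').getLast htne := List.getLast_cons htne
      rw [hlast] at hsp
      have IH0 := ih htne hsp []
      have IH1 := ih htne hsp (cur ++ [c])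
      show (if (bdC c && nextOk (d :: t')) = true then
              match lastSent [] (d :: t') with
              | some x => some x
              | none => some (PySem.Chars.strip (cur ++ [c]))
            else lastSent (cur ++ [c]) (d :: t')) = _
      rw [IH0, IH1]
      have hAL2 : afterLast (c :: d :: t') =
          (match afterLast (d :: t') with
           | some r => some r
           | none => if bdC c && spC d then some (d :: t') else none) := rfl
      have hnx : nextOk (d :: t') = spC d := rfl
      by_cases hb : (bdC c && spC d) = true
      · rw [hnx, if_pos hb]
        cases hAL : afterLast (d :: t') with
        | some r => simp [hAL2, hAL]
        | none => simp [hAL2, hAL, hb]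
      · rw [Bool.not_eq_true] at hb
        rw [hnx, if_neg (by simp [hb])]
        cases hAL : afterLast (d :: t') with
        | some r => simp [hAL2, hAL]
        | none => simp [hAL2, hAL, hb]

-- afterLast in terms of its index form
theorem afterLast_eq_idx : ∀ (u : List Char),
    afterLast u = (afterLastIdx u).map (fun j => u.drop (j + 1)) := by
  intro u
  induction u with
  | nil => rfl
  | cons a t ih =>
    cases t with
    | nil => rfl
    | cons b t' =>
      simp only [afterLast, afterLastIdx, ih]
      cases hI : afterLastIdx (b :: t') with
      | some j => simp
      | none =>
        by_cases hb : (bdC a && spC b) = true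
        · simp [hb]
        · rw [Bool.not_eq_true] at hb; simp [hb]

-- B's loop, characterised: position after the last boundary (or the initial acc)
theorem foldB (s : List Char) : ∀ (m k : Nat) (a : Int), s.length - k = m → k ≤ s.length →
    (PySem.List.pyRange (k : Int) ((s.length : Int) - 1) 1).foldl (stepB s) a =
      (match afterLastIdx (s.drop k) with
       | some j => ((k + j : Nat) : Int) + 1
       | none => a) := by
  intro m
  induction m with
  | zero =>
    intro k a hm hk
    have hk' : k = s.length := by omega
    have hnil : PySem.List.pyRange (k : Int) ((s.length : Int) - 1) 1 = [] :=
      PySem.List.pyRange_one_eq_nil (by omega)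
    rw [hnil]
    have : s.drop k = [] := by rw [hk']; simp
    simp [this, afterLastIdx]
  | succ m ihm =>
    intro k a hm hk
    have hklt : k < s.length := by omega
    obtain ⟨c, rest, hck⟩ : ∃ c rest, s.drop k = c :: rest := by
      cases hd : s.drop k with
      | nil => exfalso; have := congrArg List.length hd; simp at this; omega
      | cons c rest => exact ⟨c, rest, rfl⟩
    have hlen : s.length - k = rest.length + 1 := by
      have := congrArg List.length hck; simp at this; omega
    cases rest with
    | nil =>
      simp only [List.length_nil] at hlen
      have hkl : k + 1 = s.length := by omega
      have hnil : PySem.List.pyRange (k : Int) ((s.length : Int) - 1) 1 = [] :=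
        PySem.List.pyRange_one_eq_nil (by omega)
      rw [hnil, hck]
      simp [afterLastIdx]
    | cons d t' =>
      have hlt : k + 1 < s.length := by
        simp only [List.length_cons] at hlen; omega
      have hcons : PySem.List.pyRange (k : Int) ((s.length : Int) - 1) 1 =
          (k : Int) :: PySem.List.pyRange ((k : Int) + 1) ((s.length : Int) - 1) 1 :=
        PySem.List.pyRange_one_cons (by omega)
      rw [hcons, List.foldl_cons]
      have hdrop1 : s.drop (k + 1) = d :: t' := by
        rw [List.drop_add_one_eq_tail_drop, hck]; rfl
      have hcast : ((k : Int) + 1) = ((k + 1 : Nat) : Int) := by push_cast; ring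
      rw [hcast]
      have := ihm (k + 1) (stepB s a (k : Int)) (by omega) (by omega)
      rw [this, hdrop1, hck]
      -- evaluate stepB at k
      have hgk : PySem.List.pyGetD s (k : Int) ' ' = c := by
        rw [PySem.List.pyGetD_natCast]
        have h2 : (s.drop k)[0]? = s[k+0]? := List.getElem?_drop
        rw [hck] at h2; simp at h2
        simp [List.getD, ← h2]
      have hgk1 : PySem.List.pyGetD s ((k : Int) + 1) ' ' = d := by
        rw [hcast, PySem.List.pyGetD_natCast]
        have h2 : (s.drop (k+1))[0]? = s[(k+1)+0]? := List.getElem?_drop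
        rw [hdrop1] at h2; simp at h2
        simp [List.getD, ← h2]
      have hstep : stepB s a (k : Int) = (if bdC c && spC d then (k : Int) + 1 else a) := by
        simp only [stepB, hgk, hgk1]
      rw [hstep]
      simp only [afterLastIdx]
      cases hI : afterLastIdx (d :: t') with
      | some j =>
        show ((k + 1 + j : Nat) : Int) + 1 = ((k + (j + 1) : Nat) : Int) + 1
        push_cast; ring
      | none =>
        by_cases hb : (bdC c && spC d) = true
        · simp [hb]
        · rw [Bool.not_eq_true] at hb; simp [hb]

-- ===== VERDICT (by name: the statement is the Claim_ definition above) =====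
theorem extract_last_sentence_py_spec : Claim_equal_extract_last_sentence_py := by
  intro text _
  show extract_last_sentence_py text = extract_last_sentence_py_alt text
  unfold extract_last_sentence_py extract_last_sentence_py_alt
  dsimp only
  set s := PySem.Chars.strip text.toList with hs
  by_cases hnil : s = []
  · rw [hnil]; rfl
  · rw [if_neg hnil]
    have hB := foldB s (s.length) 0 0 (by omega) (by omega)
    simp only [List.drop_zero, Nat.cast_zero, zero_add] at hB
    have hA := foldA s s 0 [] [] (by simp)
    have hlast : PySem.Chars.isspace (s.getLast hnil) = false := strip_getLast_not_space hnil
    rw [lastSent_eq_afterLast s hnil hlast []] at hA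
    simp only [List.nil_append, Nat.cast_zero] at hA
    rw [afterLast_eq_idx] at hA
    rw [hA, hB]
    cases hI : afterLastIdx s with
    | some j =>
      simp only [Option.map_some]
      have hslice : PySem.List.slice s (some (((j : Nat) : Int) + 1)) none = s.drop (j + 1) := by
        have h1 : (((j : Nat) : Int) + 1) = (((j + 1 : Nat)) : Int) := by push_cast; ring
        rw [h1, PySem.List.slice_from_natCast]
      rw [hslice]
    | none =>
      simp only [Option.map_none]
      have hslice : PySem.List.slice s (some (0 : Int)) none = s := by
        have h0 : (0 : Int) = ((0 : Nat) : Int) := rfl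
        rw [h0, PySem.List.slice_from_natCast]; simp
      rw [hslice]
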